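-- pv_equiv track=rewrite | github.com/dsanders02/data-request-cmip7 | volume-estimate.py | define_member_size
-- ===== SOURCE A (Python) =====
-- def define_member_size(unique_ensemble_sizes):
--     other_members = []
--     if 1 in unique_ensemble_sizes:
--         one_member = 1
--     else:
--         one_member = 0
--     if 10 in unique_ensemble_sizes:
--         ten_member = 10
--     else:
--         ten_member = 0
--     for size in unique_ensemble_sizes:
--         if size != 1 and size != 10:
--             other_members.append(size)
--     other_members = sorted(other_members)
--     return one_member, ten_member, other_members
-- ===== SOURCE B (Python) =====
-- def _bisect_left(s, x):
--     lo, hi = 0, len(s)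
--     while lo < hi:
--         mid = (lo + hi) // 2
--         if s[mid] < x:
--             lo = mid + 1
--         else:
--             hi = mid
--     return lo
--
--
-- def _bisect_right(s, x):
--     lo, hi = 0, len(s)
--     while lo < hi:
--         mid = (lo + hi) // 2
--         if x < s[mid]:
--             hi = mid
--         else:
--             lo = mid + 1
--     return lo
--
--
-- def define_member_size(unique_ensemble_sizes):
--     s = sorted(unique_ensemble_sizes)
--     i1 = _bisect_left(s, 1)
--     j1 = _bisect_right(s, 1)
--     i10 = _bisect_left(s, 10)
--     j10 = _bisect_right(s, 10)
--     one_member = 1 if i1 < j1 else 0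
--     ten_member = 10 if i10 < j10 else 0
--     return one_member, ten_member, s[:i1] + s[j1:i10] + s[j10:]
-- ===== Notes on version B (the rewrite author's own statement) =====
-- stated objective: alternative
-- what changed: B sorts the input once and binary-searches the boundaries of the runs of 1s and 10s in the sorted list, reading the flags off the run widths and producing the others by concatenating three slices, instead of A's two linear membership scans plus a filter loop plus a final sort.
import Mathlib
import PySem

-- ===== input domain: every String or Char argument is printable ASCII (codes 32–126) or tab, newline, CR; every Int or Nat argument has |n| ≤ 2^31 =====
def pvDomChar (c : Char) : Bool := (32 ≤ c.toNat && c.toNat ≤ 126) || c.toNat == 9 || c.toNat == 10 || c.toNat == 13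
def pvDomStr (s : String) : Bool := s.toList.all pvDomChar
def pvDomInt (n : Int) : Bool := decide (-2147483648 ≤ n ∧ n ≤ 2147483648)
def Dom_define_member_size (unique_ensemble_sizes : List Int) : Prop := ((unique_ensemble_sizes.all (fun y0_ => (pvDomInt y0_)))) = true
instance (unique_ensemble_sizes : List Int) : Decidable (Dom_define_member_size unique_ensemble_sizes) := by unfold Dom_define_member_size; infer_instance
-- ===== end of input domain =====

-- B sorts the input once, binary-searches the boundaries of the runs of 1s and 10s in the
-- sorted list, reads the flags off the run widths and returns the others as three slices,
-- replacing A's two membership scans + filter loop + final sort (alternative algorithm).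

-- ===== PORT A =====
def define_member_size (unique_ensemble_sizes : List Int) : Int × Int × List Int :=
  let other_members : List Int :=
    unique_ensemble_sizes.foldl
      (fun acc size => if size ≠ 1 ∧ size ≠ 10 then acc ++ [size] else acc) []
  let one_member : Int := if 1 ∈ unique_ensemble_sizes then 1 else 0
  let ten_member : Int := if 10 ∈ unique_ensemble_sizes then 10 else 0
  (one_member, ten_member, PySem.List.sorted other_members (fun x => x) false)

-- ===== PORT B =====
-- Source B's _bisect_left/_bisect_right are the standard lo/hi binary-search loops; they are
-- ported as PySem.List.bisectLeft / bisectRight, which are exactly that loop.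
def define_member_size_alt (unique_ensemble_sizes : List Int) : Int × Int × List Int :=
  let s : List Int := PySem.List.sorted unique_ensemble_sizes (fun x => x) false
  let i1 : Nat := PySem.List.bisectLeft s 1
  let j1 : Nat := PySem.List.bisectRight s 1
  let i10 : Nat := PySem.List.bisectLeft s 10
  let j10 : Nat := PySem.List.bisectRight s 10
  let one_member : Int := if i1 < j1 then 1 else 0
  let ten_member : Int := if i10 < j10 then 10 else 0
  (one_member, ten_member,
    PySem.List.slice s none (some (i1 : Int))
      ++ PySem.List.slice s (some (j1 : Int)) (some (i10 : Int))
      ++ PySem.List.slice s (some (j10 : Int)) none)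

-- ===== PRECONDITION & SPEC =====
def Spec_define_member_size (unique_ensemble_sizes : List Int) (out : Int × Int × List Int) : Prop := out = define_member_size_alt unique_ensemble_sizes
instance (unique_ensemble_sizes : List Int) (out : Int × Int × List Int) : Decidable (Spec_define_member_size unique_ensemble_sizes out) := by unfold Spec_define_member_size; infer_instance

-- ===== CLAIM (what is proved, stated in full; the proofs are below) =====
def Claim_equal_define_member_size : Prop := ∀ (unique_ensemble_sizes : List Int), Dom_define_member_size unique_ensemble_sizes → Spec_define_member_size unique_ensemble_sizes (define_member_size unique_ensemble_sizes)

-- ===== LEMMAS AND PROOFS =====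

-- If p holds exactly on the indices below i, then take i / drop i are the two filters.
theorem take_drop_eq_filter_of_split (l : List Int) (p : Int → Bool) (i : Nat)
    (hi : i ≤ l.length)
    (h1 : ∀ j (hj : j < l.length), j < i → p l[j] = true)
    (h2 : ∀ j (hj : j < l.length), i ≤ j → p l[j] = false) :
    l.take i = l.filter p ∧ l.drop i = l.filter (fun y => !(p y)) := by
  have htake : ∀ y ∈ l.take i, p y = true := by
    intro y hy
    obtain ⟨j, hj, hje⟩ := List.mem_iff_getElem.mp hy
    have hjl : j < i := by simp at hj; omega
    have : (l.take i)[j] = l[j]'(by simp at hj; omega) := List.getElem_take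
    exact hje ▸ this ▸ h1 j (by simp at hj; omega) hjl
  have hdrop : ∀ y ∈ l.drop i, p y = false := by
    intro y hy
    obtain ⟨j, hj, hje⟩ := List.mem_iff_getElem.mp hy
    have hl : i + j < l.length := by simp at hj; omega
    have : (l.drop i)[j] = l[i + j]'hl := List.getElem_drop
    exact hje ▸ this ▸ h2 (i + j) hl (by omega)
  constructor
  · conv_rhs => rw [← List.take_append_drop i l]
    rw [List.filter_append, List.filter_eq_self.mpr htake,
      List.filter_eq_nil_iff.mpr (fun y hy => by simp [hdrop y hy]), List.append_nil]
  · conv_rhs => rw [← List.take_append_drop i l]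
    rw [List.filter_append, List.filter_eq_nil_iff.mpr (fun y hy => by simp [htake y hy]),
      List.filter_eq_self.mpr (fun y hy => by simp [hdrop y hy]), List.nil_append]

theorem bisect_flag (l : List Int) (x : Int) (hp : l.Pairwise (fun a b => a ≤ b)) :
    (PySem.List.bisectLeft l x < PySem.List.bisectRight l x) ↔ x ∈ l := by
  obtain ⟨hL1, hL2, hL3⟩ := PySem.List.bisectLeft_spec l x hp
  obtain ⟨hR1, hR2, hR3⟩ := PySem.List.bisectRight_spec l x hp
  constructor
  · intro h
    have hlt : PySem.List.bisectLeft l x < l.length := by omega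
    have h1 := hL3 _ hlt (le_refl _)
    have h2 := hR2 _ hlt h
    have : l[PySem.List.bisectLeft l x] = x := le_antisymm h2 h1
    exact this ▸ List.getElem_mem hlt
  · intro hx
    obtain ⟨k, hk, hke⟩ := List.mem_iff_getElem.mp hx
    by_contra h
    rcases Nat.lt_or_ge k (PySem.List.bisectLeft l x) with hk1 | hk1
    · have := hL2 k hk hk1
      omega
    · have := hR3 k hk (by omega)
      omega

-- the three slices of the sorted list are the three order filters
theorem slices_eq_filters (l : List Int) (hp : l.Pairwise (fun a b => a ≤ b)) :
    l.take (PySem.List.bisectLeft l 1) = l.filter (fun y => decide (y < 1)) ∧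
    (l.drop (PySem.List.bisectRight l 1)).take
        (PySem.List.bisectLeft l 10 - PySem.List.bisectRight l 1)
      = l.filter (fun y => decide (y < 10) && !(decide (y ≤ 1))) ∧
    l.drop (PySem.List.bisectRight l 10) = l.filter (fun y => !(decide (y ≤ 10))) := by
  obtain ⟨hA1, hA2, hA3⟩ := PySem.List.bisectLeft_spec l 1 hp
  obtain ⟨hB1, hB2, hB3⟩ := PySem.List.bisectRight_spec l 1 hp
  obtain ⟨hC1, hC2, hC3⟩ := PySem.List.bisectLeft_spec l 10 hp
  obtain ⟨hD1, hD2, hD3⟩ := PySem.List.bisectRight_spec l 10 hp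
  refine ⟨?_, ?_, ?_⟩
  · exact (take_drop_eq_filter_of_split l (fun y => decide (y < 1)) _ hA1
      (fun j hj hjlt => by simpa using hA2 j hj hjlt)
      (fun j hj hjge => by simpa using not_lt.mpr (hA3 j hj hjge))).1
  · have hdrop1 : l.drop (PySem.List.bisectRight l 1) = l.filter (fun y => !(decide (y ≤ 1))) :=
      (take_drop_eq_filter_of_split l (fun y => decide (y ≤ 1)) _ hB1
        (fun j hj hjlt => by simpa using hB2 j hj hjlt)
        (fun j hj hjge => by simpa using not_le.mpr (hB3 j hj hjge))).2
    have hmid : (l.drop (PySem.List.bisectRight l 1)).take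
        (PySem.List.bisectLeft l 10 - PySem.List.bisectRight l 1)
        = (l.drop (PySem.List.bisectRight l 1)).filter (fun y => decide (y < 10)) := by
      refine (take_drop_eq_filter_of_split _ (fun y => decide (y < 10)) _ (by simp; omega)
        ?_ ?_).1
      · intro j hj hjlt
        have hl : PySem.List.bisectRight l 1 + j < l.length := by simp at hj; omega
        have : (l.drop (PySem.List.bisectRight l 1))[j] = l[_ + j]'hl := List.getElem_drop
        rw [this]
        simpa using hC2 _ hl (by omega)
      · intro j hj hjge
        have hl : PySem.List.bisectRight l 1 + j < l.length := by simp at hj; omega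
        have : (l.drop (PySem.List.bisectRight l 1))[j] = l[_ + j]'hl := List.getElem_drop
        rw [this]
        simpa using not_lt.mpr (hC3 _ hl (by omega))
    rw [hmid, hdrop1, List.filter_filter]
  · exact (take_drop_eq_filter_of_split l (fun y => decide (y ≤ 10)) _ hD1
      (fun j hj hjlt => by simpa using hD2 j hj hjlt)
      (fun j hj hjge => by simpa using not_le.mpr (hD3 j hj hjge))).2

-- the three disjoint order filters together are a permutation of A's "other" filter
theorem count_filter_ite (b : Int) (p : Int → Bool) (v : List Int) :
    List.count b (v.filter p) = if p b then List.count b v else 0 := by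
  induction v with
  | nil => simp
  | cons a t ih =>
    by_cases hab : a = b
    · subst hab
      by_cases hpa : p a <;> simp [hpa, ih]
    · by_cases hpa : p a <;> simp [hpa, ih, hab]

theorem perm_three_filters (v : List Int) :
    (v.filter (fun y => decide (y < 1))
      ++ v.filter (fun y => decide (y < 10) && !(decide (y ≤ 1)))
      ++ v.filter (fun y => !(decide (y ≤ 10)))).Perm
    (v.filter (fun y => decide (y ≠ 1 ∧ y ≠ 10))) := by
  refine List.perm_iff_count.mpr (fun b => ?_)
  simp only [List.count_append, count_filter_ite]
  split_ifs <;> simp_all <;> omega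

-- the concatenation of the three order filters of a sorted list is sorted
theorem pairwise_three_filters (l : List Int) (hp : l.Pairwise (fun a b => a ≤ b)) :
    (l.filter (fun y => decide (y < 1))
      ++ l.filter (fun y => decide (y < 10) && !(decide (y ≤ 1)))
      ++ l.filter (fun y => !(decide (y ≤ 10)))).Pairwise (fun a b => a ≤ b) := by
  rw [List.pairwise_append]
  refine ⟨?_, hp.sublist List.filter_sublist, ?_⟩
  · rw [List.pairwise_append]
    refine ⟨hp.sublist List.filter_sublist, hp.sublist List.filter_sublist, ?_⟩
    intro a ha b hb
    have ha' := (List.mem_filter.mp ha).2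
    have hb' := (List.mem_filter.mp hb).2
    simp at ha' hb'
    omega
  · intro a ha b hb
    have hb' := (List.mem_filter.mp hb).2
    rcases List.mem_append.mp ha with ha | ha <;>
      [have ha' := (List.mem_filter.mp ha).2; have ha' := (List.mem_filter.mp ha).2] <;>
      (simp at ha' hb'; omega)

-- ===== VERDICT (by name: the statement is the Claim_ definition above) =====
theorem define_member_size_spec : Claim_equal_define_member_size := by
  intro u _
  show define_member_size u = define_member_size_alt u
  unfold define_member_size define_member_size_alt
  simp only []
  set l := PySem.List.sorted u (fun x => x) false with hl
  have hp : l.Pairwise (fun a b => a ≤ b) := PySem.List.sorted_pairwise u (fun x => x)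
  have hperm : l.Perm u := PySem.List.sorted_perm u (fun x => x) false
  obtain ⟨hs1, hs2, hs3⟩ := slices_eq_filters l hp
  rw [PySem.List.slice_to_natCast, PySem.List.slice_natCast, PySem.List.slice_from_natCast]
  refine Prod.ext ?_ (Prod.ext ?_ ?_)
  · have hflag := bisect_flag l 1 hp
    rw [hperm.mem_iff] at hflag
    by_cases h : (1 : Int) ∈ u <;> simp [h, hflag]
  · have hflag := bisect_flag l 10 hp
    rw [hperm.mem_iff] at hflag
    by_cases h : (10 : Int) ∈ u <;> simp [h, hflag]
  · show PySem.List.sorted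
        (u.foldl (fun acc size => if size ≠ 1 ∧ size ≠ 10 then acc ++ [size] else acc) [])
        (fun x => x) false = _
    rw [PySem.List.foldl_append_ite_eq_filter]
    rw [hs1, hs2, hs3]
    refine PySem.List.sorted_id_eq_of_perm_of_pairwise _ _ ?_ (pairwise_three_filters l hp)
    simp only [List.nil_append]
    exact (perm_three_filters l).trans (hperm.filter _)
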